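-- pv_equiv track=rewrite | github.com/HuyHoangUIT/Bioinformatics | Week2/SkewDiagram.py | SkewDiagram
-- ===== SOURCE A (Python) =====
-- def SkewDiagram(Genome):
--     Skew = []
--     Skew.append(0)
--
--     for i in range (len(Genome)):
--         if Genome[i] in ["A", "T"]:
--             Skew.append(Skew[i])
--         elif Genome[i] == 'G':
--             Skew.append(Skew[i] + 1)
--         elif Genome[i] == 'C':
--             Skew.append(Skew[i] - 1)
--     return ' '.join(str(num) for num in Skew)
-- ===== SOURCE B (Python) =====
-- def SkewDiagram(Genome):
--     nucs = [c for c in Genome if c in 'ATGC']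
--     return ' '.join(str(nucs[:k].count('G') - nucs[:k].count('C'))
--                     for k in range(len(nucs) + 1))
-- ===== Notes on version B (the rewrite author's own statement) =====
-- stated objective: alternative
-- what changed: B drops A's running-sum loop that re-reads Skew[i] from the growing output list: it filters the genome to its nucleotides once and then computes each skew value independently as a closed-form prefix count (number of G's minus number of C's in the first k nucleotides), with no accumulator carried between elements.
-- crash fix: On genomes where a non-A/T/G/C character precedes a later nucleotide, A raises IndexError because Skew stops growing while the loop index advances; B skips non-nucleotide characters and returns the skew sequence of the nucleotides. — e.g. on SkewDiagram("XG"): A raises IndexError, B returns "0 1"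
import Mathlib
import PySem

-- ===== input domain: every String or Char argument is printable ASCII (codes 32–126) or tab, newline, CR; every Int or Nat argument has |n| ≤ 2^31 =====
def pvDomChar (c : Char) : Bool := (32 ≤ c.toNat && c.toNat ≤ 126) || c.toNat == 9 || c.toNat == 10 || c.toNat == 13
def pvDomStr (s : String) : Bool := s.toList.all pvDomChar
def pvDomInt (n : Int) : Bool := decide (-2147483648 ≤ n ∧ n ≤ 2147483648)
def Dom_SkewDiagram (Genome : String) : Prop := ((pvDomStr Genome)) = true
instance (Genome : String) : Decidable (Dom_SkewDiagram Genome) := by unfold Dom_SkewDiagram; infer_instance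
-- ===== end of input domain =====

-- B replaces A's running-sum loop that re-reads Skew[i] from the growing output list by an
-- independent closed-form per-prefix count (G-count minus C-count of each nucleotide prefix);
-- Pre_ excludes the inputs on which A raises IndexError, where B still returns a value (Raises_ block).


-- ===== PORT A =====
-- loop body of A: at index i, branch on Genome[i]; Skew[i] is Python list indexing
-- (PySem.List.pyGet?; none = IndexError, propagated as a none state).
def skewStepA (cs : List Char) (acc : Option (List Int)) (i : Nat) : Option (List Int) :=
  match acc with
  | none => none
  | some skew =>
    let c := cs.getD i ' '          -- Genome[i]; i < len(Genome) inside range(len(Genome))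
    if c == 'A' || c == 'T' then
      match PySem.List.pyGet? skew (i : Int) with
      | none => none
      | some v => some (skew ++ [v])
    else if c == 'G' then
      match PySem.List.pyGet? skew (i : Int) with
      | none => none
      | some v => some (skew ++ [v + 1])
    else if c == 'C' then
      match PySem.List.pyGet? skew (i : Int) with
      | none => none
      | some v => some (skew ++ [v - 1])
    else some skew

def SkewDiagram (Genome : String) : String :=
  let cs := Genome.toList
  match (List.range cs.length).foldl (skewStepA cs) (some [0]) with
  | none => ""                      -- Python raises IndexError here (outside Pre_)
  | some skew => PySem.Str.join " " (skew.map PySem.Int.toStr)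

-- ===== PORT B =====
def SkewDiagram_alt (Genome : String) : String :=
  let nucs := Genome.toList.filter (fun c => "ATGC".toList.contains c)
  PySem.Str.join " " ((List.range (nucs.length + 1)).map
    (fun k => PySem.Int.toStr
      ((PySem.List.count (nucs.take k) 'G') - (PySem.List.count (nucs.take k) 'C'))))

-- ===== PRECONDITION & SPEC =====
def isNuc (c : Char) : Bool := c == 'A' || c == 'T' || c == 'G' || c == 'C'

-- Pre_ excludes exactly the inputs where A raises IndexError: a non-nucleotide character
-- followed later by a nucleotide (Skew stops growing, so Skew[i] indexes out of range).
def Pre_SkewDiagram (Genome : String) : Prop :=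
  (Genome.toList.dropWhile isNuc).all (fun c => !isNuc c) = true
instance (Genome : String) : Decidable (Pre_SkewDiagram Genome) := by
  unfold Pre_SkewDiagram; infer_instance

def pvWitness_SkewDiagram : String := "GATCX!"

-- On genomes where a non-A/T/G/C character precedes a later nucleotide, A raises IndexError;
-- B skips non-nucleotides and returns the skew sequence of the nucleotides.
def Raises_SkewDiagram (Genome : String) : Prop := ¬ Pre_SkewDiagram Genome
instance (Genome : String) : Decidable (Raises_SkewDiagram Genome) := by
  unfold Raises_SkewDiagram; infer_instance
def pvRaiseWitness_SkewDiagram : String := "XG"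
def pvRaiseWitnessOut_SkewDiagram : String := "0 1"

def Spec_SkewDiagram (Genome : String) (out : String) : Prop := out = SkewDiagram_alt Genome
instance (Genome : String) (out : String) : Decidable (Spec_SkewDiagram Genome out) := by
  unfold Spec_SkewDiagram; infer_instance

-- ===== CLAIM (what is proved, stated in full; the proofs are below) =====
def Claim_equal_SkewDiagram : Prop := ∀ (Genome : String), Dom_SkewDiagram Genome → Pre_SkewDiagram Genome → Spec_SkewDiagram Genome (SkewDiagram Genome)

def Claim_raises_SkewDiagram : Prop := (∀ (Genome : String), Dom_SkewDiagram Genome → Raises_SkewDiagram Genome → ¬ Pre_SkewDiagram Genome) ∧ (Dom_SkewDiagram (pvRaiseWitness_SkewDiagram) ∧ Raises_SkewDiagram (pvRaiseWitness_SkewDiagram) ∧ SkewDiagram_alt (pvRaiseWitness_SkewDiagram) = pvRaiseWitnessOut_SkewDiagram)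

-- ===== LEMMAS AND PROOFS =====

def deltaOf (c : Char) : Int := if c == 'G' then 1 else if c == 'C' then -1 else 0

-- A's Skew list after the first n loop iterations (while inside the nucleotide prefix)
def skewListOf (cs : List Char) (n : Nat) : List Int :=
  (List.range (n + 1)).map (fun k => ((cs.take k).map deltaOf).sum)

theorem skewListOf_succ (cs : List Char) (n : Nat) (h : n < cs.length) :
    skewListOf cs (n + 1) = skewListOf cs n ++ [((cs.take n).map deltaOf).sum + deltaOf cs[n]] := by
  have h2 : (cs.map deltaOf).take (n+1) = (cs.map deltaOf).take n ++ [deltaOf cs[n]] := by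
    rw [List.take_succ_eq_append_getElem (by simpa using h)]
    simp
  simp [skewListOf, List.range_succ, h2]

theorem skewListOf_get (cs : List Char) (n : Nat) :
    (skewListOf cs n)[n]? = some ((List.take n (List.map deltaOf cs)).sum) := by
  simp [skewListOf]

-- A-side loop invariant: the fold over range(n) builds the skew list of the (clamped)
-- nucleotide prefix; past the prefix the state no longer changes (Pre_ makes all later
-- characters non-nucleotides).
theorem A_inv (cs : List Char) (hpre : (cs.dropWhile isNuc).all (fun c => !isNuc c) = true)
    (n : Nat) (hn : n ≤ cs.length) :
    (List.range n).foldl (skewStepA cs) (some [0]) =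
      some (skewListOf cs (min n (cs.takeWhile isNuc).length)) := by
  induction n with
  | zero => simp [skewListOf]
  | succ n ih =>
    rw [List.range_succ, List.foldl_append, ih (by omega)]
    have hlt : n < cs.length := by omega
    simp only [List.foldl_cons, List.foldl_nil]
    by_cases hm : n < (cs.takeWhile isNuc).length
    · -- nucleotide zone
      have hmin : min n (cs.takeWhile isNuc).length = n := by omega
      have hmin' : min (n+1) (cs.takeWhile isNuc).length = n + 1 := by omega
      have hcn : isNuc cs[n] = true := by
        have h1 : (cs.takeWhile isNuc)[n] = cs[n] := (List.takeWhile_prefix (p := isNuc)).getElem hm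
        rw [← h1]; exact List.mem_takeWhile_imp (List.getElem_mem hm)
      rw [hmin, hmin']
      have hgd : cs.getD n ' ' = cs[n] := List.getD_eq_getElem cs ' ' hlt
      simp only [skewStepA, hgd]
      rw [skewListOf_succ cs n hlt]
      revert hcn
      generalize cs[n] = c
      intro hcn
      simp only [isNuc, Bool.or_eq_true, beq_iff_eq] at hcn
      rcases hcn with ((h | h) | h) | h <;> subst h <;>
        simp [skewListOf_get, deltaOf, sub_eq_add_neg]
    · -- past the nucleotide prefix: character is a non-nucleotide, state unchanged
      have hm' : (cs.takeWhile isNuc).length ≤ n := by omega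
      have hmin : min n (cs.takeWhile isNuc).length = (cs.takeWhile isNuc).length := by omega
      have hmin' : min (n+1) (cs.takeWhile isNuc).length = (cs.takeWhile isNuc).length := by omega
      have hsplit : cs.takeWhile isNuc ++ cs.dropWhile isNuc = cs := List.takeWhile_append_dropWhile
      have hlen : cs.length = (cs.takeWhile isNuc).length + (cs.dropWhile isNuc).length := by
        have := congrArg List.length hsplit
        rw [List.length_append] at this
        omega
      have hcn : isNuc cs[n] = false := by
        have h2 : n < (cs.takeWhile isNuc ++ cs.dropWhile isNuc).length := by rw [hsplit]; exact hlt
        have h3 : cs[n] = (cs.takeWhile isNuc ++ cs.dropWhile isNuc)[n]'h2 := by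
          congr 1; exact hsplit.symm
        have hidx : n - (cs.takeWhile isNuc).length < (cs.dropWhile isNuc).length := by omega
        rw [h3, List.getElem_append_right hm']
        have := List.all_eq_true.mp hpre _ (List.getElem_mem hidx)
        simpa using this
      rw [hmin, hmin']
      have hgd : cs.getD n ' ' = cs[n] := List.getD_eq_getElem cs ' ' hlt
      simp only [skewStepA, hgd]
      revert hcn
      generalize cs[n] = c
      intro hcn
      simp only [isNuc] at hcn
      simp only [Bool.or_eq_false_iff] at hcn
      simp [hcn.1.1.1, hcn.1.1.2, hcn.1.2, hcn.2]

theorem contains_eq_isNuc : (fun c => "ATGC".toList.contains c) = isNuc := by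
  funext c
  simp [isNuc, Bool.or_assoc, beq_eq_decide]

theorem filter_eq_takeWhile (cs : List Char)
    (hpre : (cs.dropWhile isNuc).all (fun c => !isNuc c) = true) :
    cs.filter isNuc = cs.takeWhile isNuc := by
  conv_lhs => rw [← List.takeWhile_append_dropWhile (p := isNuc) (l := cs)]
  rw [List.filter_append]
  rw [List.filter_eq_self.mpr (fun x hx => List.mem_takeWhile_imp hx)]
  rw [List.filter_eq_nil_iff.mpr (fun x hx => by
    have := List.all_eq_true.mp hpre x hx
    simpa using this)]
  simp

-- the closed form: a delta sum over any char list is its G-count minus its C-count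
theorem delta_sum_eq_counts (l : List Char) :
    (l.map deltaOf).sum = (l.count 'G' : Int) - (l.count 'C' : Int) := by
  induction l with
  | nil => simp
  | cons c l ih =>
    simp only [List.map_cons, List.sum_cons, ih, List.count_cons]
    by_cases hG : c = 'G'
    · subst hG; simp [deltaOf]; ring
    · by_cases hC : c = 'C'
      · subst hC; simp [deltaOf]; ring
      · have : deltaOf c = 0 := by simp [deltaOf, hG, hC]
        simp [this, hG, hC, Ne.symm]

theorem main_eq (Genome : String)
    (hpre : (Genome.toList.dropWhile isNuc).all (fun c => !isNuc c) = true) :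
    SkewDiagram Genome = SkewDiagram_alt Genome := by
  unfold SkewDiagram SkewDiagram_alt
  simp only [contains_eq_isNuc]
  set cs := Genome.toList with hcs
  set t := cs.takeWhile isNuc with ht
  have hm : t.length ≤ cs.length := (List.takeWhile_prefix isNuc).length_le
  rw [A_inv cs hpre cs.length le_rfl, Nat.min_eq_right hm]
  rw [filter_eq_takeWhile cs hpre]
  simp only []
  congr 1
  have hsplit : t ++ cs.dropWhile isNuc = cs := List.takeWhile_append_dropWhile
  have hentry : skewListOf cs t.length =
      (List.range (t.length + 1)).map (fun k => ((t.take k).map deltaOf).sum) := by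
    unfold skewListOf
    refine List.map_congr_left (fun k hk => ?_)
    have hk' : k ≤ t.length := by
      have := List.mem_range.mp hk; omega
    rw [← hsplit, List.take_append_of_le_length hk']
  rw [hentry, List.map_map]
  refine List.map_congr_left (fun k _ => ?_)
  simp only [Function.comp, PySem.List.count_eq, ← List.map_take, delta_sum_eq_counts]
  rfl

-- ===== VERDICT (by name: the statement is the Claim_ definition above) =====
theorem SkewDiagram_spec : Claim_equal_SkewDiagram := by
  intro Genome _ hpre
  unfold Spec_SkewDiagram
  exact main_eq Genome hpre

theorem SkewDiagram_raises : Claim_raises_SkewDiagram := by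
  unfold Claim_raises_SkewDiagram
  exact ⟨fun _ _ h => h, by decide⟩

-- self-check: the raise witness really lies inside Raises_
theorem SkewDiagram_raises_witness_ok : Raises_SkewDiagram pvRaiseWitness_SkewDiagram :=
  SkewDiagram_raises.2.2.1
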